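-- pv_equiv track=rewrite | github.com/adrianau/advent-of-code-2023 | day5.py | get_map_ranges
-- ===== SOURCE A (Python) =====
-- def get_map_ranges(lines):
--     # Compute a list of map ranges
--     # A map range is a 2-element list of the start/end indices of a map
--     # e.g. [3,10] = map starts at index 3 (incl.), ends at index 10 (excl.)
--     map_ranges = []
--     input_length = len(lines)
--     for idx, line in enumerate(lines):
--         # If end of input (which is not a new line), set end index to -1
--         if idx == input_length - 1:
--             map_ranges[-1].append(-1)
--             break
--
--         # If blank line, end current map range and start the next one
--         if line == '\n':
--             if map_ranges:
--                 map_ranges[-1].append(idx)  # Add end index to current map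
--
--             map_ranges.append([idx+2])  # Add start index of the next map
--
--     return map_ranges
-- ===== SOURCE B (Python) =====
-- def get_map_ranges(lines):
--     # Different decomposition: collect blank-line indices first (excluding the
--     # final line, which the loop's break reaches before the blank test), then
--     # build each range's start and link ends in a second pass.
--     if not lines:
--         return []
--     blanks = [i for i in range(len(lines) - 1) if lines[i] == '\n']
--     ranges = [[b + 2] for b in blanks]
--     for j in range(len(blanks) - 1):
--         ranges[j].append(blanks[j + 1])
--     ranges[-1].append(-1)
--     return ranges
-- ===== Notes on version B (the rewrite author's own statement) =====
-- stated objective: alternative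
-- what changed: A's single stateful scan with enumerate/break and mutation of the last open range is replaced by a blank-index-first decomposition: collect the indices of blank lines (excluding the final line), build each range's start as b+2, link each range's end to the next blank in a second pass, and close the last range with -1.
import Mathlib
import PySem

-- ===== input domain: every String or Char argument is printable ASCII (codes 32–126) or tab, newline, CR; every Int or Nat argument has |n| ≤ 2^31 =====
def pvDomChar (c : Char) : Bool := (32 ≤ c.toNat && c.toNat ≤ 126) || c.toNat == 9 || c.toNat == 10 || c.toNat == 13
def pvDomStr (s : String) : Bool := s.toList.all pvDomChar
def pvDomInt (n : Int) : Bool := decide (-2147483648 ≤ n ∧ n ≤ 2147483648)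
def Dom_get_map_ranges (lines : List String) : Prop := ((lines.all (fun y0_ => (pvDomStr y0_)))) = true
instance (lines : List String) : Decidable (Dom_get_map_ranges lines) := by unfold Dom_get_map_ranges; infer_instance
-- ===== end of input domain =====

-- B rewrites A's single stateful scan as: collect blank-line indices, build starts, link ends
-- in a second pass (objective: alternative decomposition, same O(n) cost).

-- ===== PORT A =====
-- map_ranges[-1].append(x): append x to the last element; Python raises IndexError on [],
-- which Pre_ excludes (the Lean helper returns [] there, outside the claim).
def pyAppendLast (acc : List (List Int)) (x : Int) : List (List Int) :=
  match acc with
  | [] => []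
  | [l] => [l ++ [x]]
  | h :: t => h :: pyAppendLast t x

-- the for-loop of A: enumerate with break at idx = input_length - 1
def aLoop (rest : List String) (idx : Nat) (n : Nat) (acc : List (List Int)) : List (List Int) :=
  match rest with
  | [] => acc
  | line :: r =>
    if idx = n - 1 then pyAppendLast acc (-1)
    else if line = "\n" then
      let acc' := if acc ≠ [] then pyAppendLast acc ((idx : Int)) else acc
      aLoop r (idx + 1) n (acc' ++ [[(idx : Int) + 2]])
    else aLoop r (idx + 1) n acc

def get_map_ranges (lines : List String) : List (List Int) :=
  aLoop lines 0 lines.length []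

-- ===== PORT B =====
-- lines[i] with 0 ≤ i < len(lines) is exact as getD; ranges[j].append via List.modify.
def get_map_ranges_alt (lines : List String) : List (List Int) :=
  if lines = [] then []
  else
    let blanks := (List.range (lines.length - 1)).filter (fun i => lines.getD i "" = "\n")
    let ranges := blanks.map (fun b => [((b : Int)) + 2])
    let linked := (List.range (blanks.length - 1)).foldl
      (fun r j => r.modify j (fun l => l ++ [((blanks.getD (j + 1) 0 : Nat) : Int)])) ranges
    pyAppendLast linked (-1)

-- ===== PRECONDITION & SPEC =====
-- Pre_ excludes exactly the inputs where A raises IndexError (a non-empty input with no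
-- blank line before its last line); B raises IndexError there too.
def Pre_get_map_ranges (lines : List String) : Prop :=
  lines = [] ∨ "\n" ∈ lines.dropLast
instance (lines : List String) : Decidable (Pre_get_map_ranges lines) := by
  unfold Pre_get_map_ranges; infer_instance

def pvWitness_get_map_ranges : List String := ["a", "\n", "b", "c"]

def Spec_get_map_ranges (lines : List String) (out : List (List Int)) : Prop := out = get_map_ranges_alt lines
instance (lines : List String) (out : List (List Int)) : Decidable (Spec_get_map_ranges lines out) := by unfold Spec_get_map_ranges; infer_instance

-- ===== CLAIM (what is proved, stated in full; the proofs are below) =====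
def Claim_equal_get_map_ranges : Prop := ∀ (lines : List String), Dom_get_map_ranges lines → Pre_get_map_ranges lines → Spec_get_map_ranges lines (get_map_ranges lines)

-- ===== LEMMAS AND PROOFS =====

-- relative blank indices of `lines`, the last line excluded
def blanksRel : List String → List Nat
  | [] => []
  | [_] => []
  | l :: r => (if l = "\n" then [0] else []) ++ (blanksRel r).map (· + 1)

-- the linked ranges a blank list denotes: [[b1+2,b2],[b2+2,b3],…,[bm+2]]
def specR : List Nat → List (List Int)
  | [] => []
  | [b] => [[(b : Int) + 2]]
  | b :: b' :: t => [(b : Int) + 2, (b' : Int)] :: specR (b' :: t)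

theorem specR_ne_nil (bs : List Nat) (h : bs ≠ []) : specR bs ≠ [] := by
  match bs with
  | [] => exact absurd rfl h
  | [b] => simp [specR]
  | b :: b' :: t => simp [specR]

theorem specR_snoc (bs : List Nat) (c : Nat) (h : bs ≠ []) :
    specR (bs ++ [c]) = pyAppendLast (specR bs) ((c : Int)) ++ [[(c : Int) + 2]] := by
  match bs with
  | [] => exact absurd rfl h
  | [b] => simp [specR, pyAppendLast]
  | b :: b' :: t =>
    have ih := specR_snoc (b' :: t) c (by simp)
    simp only [List.cons_append] at ih ⊢
    rw [show specR (b :: b' :: (t ++ [c])) = [(b : Int) + 2, (b' : Int)] :: specR (b' :: (t ++ [c])) from rfl]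
    rw [ih]
    cases h2 : specR (b' :: t) with
    | nil => exact absurd h2 (specR_ne_nil _ (by simp))
    | cons x xs => simp [specR, pyAppendLast, h2]

-- A's loop, characterised: state = specR of the blanks so far
theorem aLoop_char (rest : List String) : ∀ (idx : Nat) (bs : List Nat), rest ≠ [] →
    aLoop rest idx (idx + rest.length) (specR bs) =
      pyAppendLast (specR (bs ++ (blanksRel rest).map (· + idx))) (-1) := by
  induction rest with
  | nil => intro _ _ h; exact absurd rfl h
  | cons l r ih =>
    intro idx bs _
    cases r with
    | nil => simp [aLoop, blanksRel]
    | cons l' r' =>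
      have hun : ∀ acc : List (List Int),
          aLoop (l :: l' :: r') idx (idx + (l :: l' :: r').length) acc =
          if idx = idx + (l :: l' :: r').length - 1 then pyAppendLast acc (-1)
          else if l = "\n" then
            aLoop (l' :: r') (idx + 1) (idx + (l :: l' :: r').length)
              ((if acc ≠ [] then pyAppendLast acc ((idx : Int)) else acc) ++ [[(idx : Int) + 2]])
          else aLoop (l' :: r') (idx + 1) (idx + (l :: l' :: r').length) acc := fun acc => rfl
      have hidx' : ¬ (idx = idx + (l :: l' :: r').length - 1) := by
        simp only [List.length_cons]; omega
      have harith : idx + (l :: l' :: r').length = (idx + 1) + (l' :: r').length := by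
        simp only [List.length_cons]; omega
      have hcomp : ∀ (xs : List Nat), (xs.map (· + 1)).map (· + idx) = xs.map (· + (idx + 1)) := by
        intro xs
        rw [List.map_map]
        apply List.map_congr_left
        intro a _
        simp only [Function.comp_apply]
        omega
      by_cases hl : l = "\n"
      · subst hl
        have hstep : (if specR bs ≠ [] then pyAppendLast (specR bs) ((idx : Int)) else specR bs)
            ++ [[(idx : Int) + 2]] = specR (bs ++ [idx]) := by
          by_cases hbs : bs = []
          · subst hbs; simp [specR]
          · rw [if_pos (specR_ne_nil bs hbs), specR_snoc bs idx hbs]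
        have ihr := ih (idx + 1) (bs ++ [idx]) (by simp)
        have hmap : (blanksRel ("\n" :: l' :: r')).map (· + idx)
            = idx :: (blanksRel (l' :: r')).map (· + (idx + 1)) := by
          show ((if ("\n" : String) = "\n" then [0] else [])
              ++ (blanksRel (l' :: r')).map (· + 1)).map (· + idx) = _
          rw [if_pos rfl, List.map_append, hcomp]
          simp
        rw [hun, if_neg hidx', if_pos rfl, hstep, harith, ihr, hmap]
        simp
      · have ihr := ih (idx + 1) bs (by simp)
        have hmap : (blanksRel (l :: l' :: r')).map (· + idx)
            = (blanksRel (l' :: r')).map (· + (idx + 1)) := by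
          show ((if l = "\n" then [0] else [])
              ++ (blanksRel (l' :: r')).map (· + 1)).map (· + idx) = _
          rw [if_neg hl, List.nil_append, hcomp]
        rw [hun, if_neg hidx', if_neg hl, harith, ihr, hmap]

-- B's filter over range = the relative blank indices
theorem filter_eq_blanksRel (lines : List String) :
    (List.range (lines.length - 1)).filter (fun i => lines.getD i "" = "\n") = blanksRel lines := by
  induction lines with
  | nil => simp [blanksRel]
  | cons l r ih =>
    cases r with
    | nil => simp [blanksRel]
    | cons l' r' =>
      have hlen : (l :: l' :: r').length - 1 = (l' :: r').length - 1 + 1 := by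
        simp [List.length_cons]
      have hpred : ((fun i => decide ((l :: l' :: r').getD i "" = "\n")) ∘ Nat.succ)
          = (fun i => decide ((l' :: r').getD i "" = "\n")) := by
        funext i; simp [List.getD]
      have hmap1 : (blanksRel (l' :: r')).map Nat.succ = (blanksRel (l' :: r')).map (· + 1) := by
        apply List.map_congr_left
        intro a _
        omega
      have hR : blanksRel (l :: l' :: r')
          = (if l = "\n" then [0] else []) ++ (blanksRel (l' :: r')).map (· + 1) := rfl
      rw [hlen, List.range_succ_eq_map, List.filter_cons, List.filter_map, hpred, ih, hmap1, hR]
      by_cases hl : l = "\n"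
      · simp [List.getD, hl]
      · simp [List.getD, hl]

-- the head-preserving fold step: modify (j+1) on a cons acts on the tail
theorem foldl_modify_cons (l : List Nat) (g : Nat → List Int → List Int) :
    ∀ (h : List Int) (tl : List (List Int)),
    l.foldl (fun r j => r.modify (j + 1) (g j)) (h :: tl)
      = h :: l.foldl (fun r j => r.modify j (g j)) tl := by
  induction l with
  | nil => intro h tl; rfl
  | cons j js ih =>
    intro h tl
    simp only [List.foldl_cons]
    rw [show (h :: tl).modify (j + 1) (g j) = h :: tl.modify j (g j) from rfl]
    exact ih h _

-- B's linking fold computes specR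
theorem link_eq_specR (bs : List Nat) :
    (List.range (bs.length - 1)).foldl
      (fun r j => r.modify j (fun l => l ++ [((bs.getD (j + 1) 0 : Nat) : Int)]))
      (bs.map (fun b => [((b : Int)) + 2])) = specR bs := by
  match bs with
  | [] => rfl
  | [b] => rfl
  | b :: b' :: t =>
    have ih := link_eq_specR (b' :: t)
    have hlen : (b :: b' :: t).length - 1 = (b' :: t).length - 1 + 1 := by
      simp [List.length_cons]
    rw [hlen, List.range_succ_eq_map, List.foldl_cons]
    have hfirst : ((b :: b' :: t).map (fun b => [((b : Int)) + 2])).modify 0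
        (fun l => l ++ [(((b :: b' :: t).getD 1 0 : Nat) : Int)])
        = [(b : Int) + 2, (b' : Int)] :: ((b' :: t).map (fun b => [((b : Int)) + 2])) := by
      simp [List.getD]
    rw [hfirst, List.foldl_map]
    rw [show (fun (r : List (List Int)) (j : Nat) =>
          r.modify (Nat.succ j) (fun l => l ++ [(((b :: b' :: t).getD (Nat.succ j + 1) 0 : Nat) : Int)]))
        = (fun (r : List (List Int)) (j : Nat) =>
          r.modify (j + 1) ((fun j l => l ++ [(((b' :: t).getD (j + 1) 0 : Nat) : Int)]) j)) from by
      funext r j; simp [List.getD]]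
    rw [foldl_modify_cons, ih]
    rfl

-- both ports equal the same closed description
theorem portA_eq (lines : List String) :
    get_map_ranges lines = if lines = [] then []
      else pyAppendLast (specR (blanksRel lines)) (-1) := by
  cases lines with
  | nil => rfl
  | cons l r =>
    simp only [get_map_ranges, if_neg (by simp : ¬ (l :: r = []))]
    have := aLoop_char (l :: r) 0 [] (by simp)
    simp only [Nat.zero_add] at this
    rw [show ([] : List (List Int)) = specR [] from rfl, this]
    congr 2
    simp only [List.nil_append]
    rw [show (blanksRel (l :: r)) = (blanksRel (l :: r)).map id from (List.map_id _).symm]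
    simp only [List.map_map]
    apply List.map_congr_left
    intro a _
    simp

theorem portB_eq (lines : List String) :
    get_map_ranges_alt lines = if lines = [] then []
      else pyAppendLast (specR (blanksRel lines)) (-1) := by
  cases lines with
  | nil => rfl
  | cons l r =>
    simp only [get_map_ranges_alt, if_neg (by simp : ¬ (l :: r = []))]
    rw [show ((List.range ((l :: r).length - 1)).filter (fun i => (l :: r).getD i "" = "\n"))
        = blanksRel (l :: r) from filter_eq_blanksRel (l :: r)]
    rw [link_eq_specR]

-- ===== VERDICT (by name: the statement is the Claim_ definition above) =====
theorem get_map_ranges_spec : Claim_equal_get_map_ranges := by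
  intro lines _ _
  unfold Spec_get_map_ranges
  rw [portA_eq, portB_eq]
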